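-- pv_equiv track=rewrite | github.com/yu-steven/openit | utils/pool/parse.py | parse
-- ===== SOURCE A (Python) =====
-- def parse(data_in):
--     dtp = []
--     for x in data_in:
--         dtp.append(x.replace('data/', ''))
--     dtpr1 = [ x for x in dtp if "/" in x]
--     dtpr2 = [ x for x in dtpr1 if ".yaml" in x]
--     textdict = {}
--     for x in dtpr2:
--         date, filename = x.split('/')
--         if date in textdict:
--             textdict[date].append(filename)
--         else:
--             textdict[date] = []
--             textdict[date].append(filename)
--
--     return textdict
-- ===== SOURCE B (Python) =====
-- def parse(data_in):
--     # One fused pass: replace + both substring filters + split, collecting (date, filename)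
--     # pairs; then build the dict by inserting, for each first-seen date, all of its
--     # filenames at once with a comprehension over the pair list.
--     pairs = []
--     for x in data_in:
--         y = x.replace('data/', '')
--         if '/' in y and '.yaml' in y:
--             date, filename = y.split('/')
--             pairs.append((date, filename))
--     result = {}
--     for date, _ in pairs:
--         if date not in result:
--             result[date] = [f for d, f in pairs if d == date]
--     return result
-- ===== Notes on version B (the rewrite author's own statement) =====
-- stated objective: alternative
-- what changed: Replaces A's four passes (replace loop, two filter comprehensions, incremental dict accumulation with per-key append) by one fused pass producing (date, filename) pairs followed by grouping that inserts each first-seen date once with the complete filename list collected by a comprehension.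
import Mathlib
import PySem

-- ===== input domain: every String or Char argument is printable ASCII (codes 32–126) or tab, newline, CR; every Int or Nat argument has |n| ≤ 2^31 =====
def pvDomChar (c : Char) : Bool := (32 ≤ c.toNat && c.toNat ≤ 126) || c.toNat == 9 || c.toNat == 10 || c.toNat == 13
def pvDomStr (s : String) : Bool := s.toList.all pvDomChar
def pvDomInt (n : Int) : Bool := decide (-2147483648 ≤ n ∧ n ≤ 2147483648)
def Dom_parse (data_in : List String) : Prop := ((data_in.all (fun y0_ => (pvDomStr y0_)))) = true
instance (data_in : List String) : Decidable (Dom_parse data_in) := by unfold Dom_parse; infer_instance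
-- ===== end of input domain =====

-- B fuses A's four passes (replace loop, two filter comprehensions, incremental dict
-- accumulation with per-key append) into one pair-collecting pass plus a grouping pass that
-- inserts each first-seen date once with its complete filename list; alternative decomposition.


-- ===== PORT A =====
-- the body of A's dict loop: 'date, filename = x.split('/')' then append (under a fresh [] if new);
-- the fall-through arm is the ValueError case, excluded by Pre_parse
def parseAStep (d : PySem.Dict String (List String)) (x : String) : PySem.Dict String (List String) :=
  match PySem.Str.split? x "/" with
  | some [date, filename] =>
      if d.contains date then d.modify date [] (· ++ [filename])
      else (d.insert date []).modify date [] (· ++ [filename])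
  | _ => d

def parse (data_in : List String) : List (String × List String) :=
  let dtp := data_in.foldl (fun acc x => acc ++ [PySem.Str.replace x "data/" ""]) []
  let dtpr1 := dtp.filter (fun x => PySem.Str.isIn "/" x)
  let dtpr2 := dtpr1.filter (fun x => PySem.Str.isIn ".yaml" x)
  let textdict := dtpr2.foldl parseAStep PySem.Dict.empty
  textdict.items

-- ===== PORT B =====
-- B's collecting loop body: strip 'data/', keep the '/'-and-'.yaml' strings, split into a pair
-- (the fall-through arm is the ValueError case, excluded by Pre_parse)
def parseAltCollect (acc : List (String × String)) (x : String) : List (String × String) :=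
  let y := PySem.Str.replace x "data/" ""
  if PySem.Str.isIn "/" y && PySem.Str.isIn ".yaml" y then
    match PySem.Str.split? y "/" with
    | some [date, filename] => acc ++ [(date, filename)]
    | _ => acc
  else acc

-- B's comprehension '[f for d, f in pairs if d == date]'
def parseAltVal (ps : List (String × String)) (c : String) : List String :=
  (ps.filter (fun q => q.1 == c)).map (·.2)

-- B's grouping loop body: insert each first-seen date with its full filename list
def parseAltGroup (ps : List (String × String)) (d : PySem.Dict String (List String))
    (p : String × String) : PySem.Dict String (List String) :=
  if d.contains p.1 then d else d.insert p.1 (parseAltVal ps p.1)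

def parse_alt (data_in : List String) : List (String × List String) :=
  let pairs := data_in.foldl parseAltCollect []
  let result := pairs.foldl (parseAltGroup pairs) PySem.Dict.empty
  result.items

-- ===== PRECONDITION & SPEC =====
-- Pre_parse excludes exactly the inputs where A raises ValueError: an element whose
-- 'data/'-stripped form contains both "/" and ".yaml" but does not split at "/" into
-- exactly two pieces (the 2-variable unpacking fails).
def Pre_parse (data_in : List String) : Prop :=
  ∀ x ∈ data_in,
    PySem.Str.isIn "/" (PySem.Str.replace x "data/" "") = true →
    PySem.Str.isIn ".yaml" (PySem.Str.replace x "data/" "") = true →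
    ((PySem.Str.split? (PySem.Str.replace x "data/" "") "/").getD []).length = 2
instance (data_in : List String) : Decidable (Pre_parse data_in) := by unfold Pre_parse; infer_instance
def pvWitness_parse : List String := ["data/2021/a.yaml", "2021/b.yaml", "2022/c.yaml", "nope"]
def Spec_parse (data_in : List String) (out : List (String × List String)) : Prop := out = parse_alt data_in
instance (data_in : List String) (out : List (String × List String)) : Decidable (Spec_parse data_in out) := by unfold Spec_parse; infer_instance

-- ===== CLAIM (what is proved, stated in full; the proofs are below) =====
def Claim_equal_parse : Prop := ∀ (data_in : List String), Dom_parse data_in → Pre_parse data_in → Spec_parse data_in (parse data_in)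

-- ===== LEMMAS AND PROOFS =====

lemma pv_bool_false {b : Bool} (h : ¬ b = true) : b = false := by
  cases b
  · rfl
  · exact absurd rfl h

-- the pair a well-formed element splits into
def pvToPair (y : String) : String × String :=
  match PySem.Str.split? y "/" with
  | some [a, b] => (a, b)
  | _ => ("", "")

lemma pv_split_two {y : String} (h : ((PySem.Str.split? y "/").getD []).length = 2) :
    PySem.Str.split? y "/" = some [(pvToPair y).1, (pvToPair y).2] := by
  cases hsp : PySem.Str.split? y "/" with
  | none => rw [hsp] at h; simp at h
  | some l =>
    rw [hsp] at h
    obtain ⟨a, b, rfl⟩ := List.length_eq_two.1 (by simpa using h)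
    simp [pvToPair, hsp]

-- A's two filters fuse into one conjunctive filter
lemma pv_filter_fuse (l : List String) :
    (l.filter (fun x => PySem.Str.isIn "/" x)).filter (fun x => PySem.Str.isIn ".yaml" x)
      = l.filter (fun y => PySem.Str.isIn "/" y && PySem.Str.isIn ".yaml" y) := by
  induction l with
  | nil => rfl
  | cons x l ih =>
    by_cases h1 : PySem.Str.isIn "/" x = true
    · rw [List.filter_cons, if_pos h1, List.filter_cons]
      by_cases h2 : PySem.Str.isIn ".yaml" x = true
      · rw [if_pos h2, List.filter_cons,
          if_pos (show (PySem.Str.isIn "/" x && PySem.Str.isIn ".yaml" x) = true by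
            rw [h1, h2]; exact rfl), ih]
      · rw [if_neg h2, List.filter_cons,
          if_neg (show ¬(PySem.Str.isIn "/" x && PySem.Str.isIn ".yaml" x) = true by
            intro hcontr
            rw [Bool.and_eq_true] at hcontr
            exact h2 hcontr.2), ih]
    · rw [List.filter_cons, if_neg h1, List.filter_cons,
        if_neg (show ¬(PySem.Str.isIn "/" x && PySem.Str.isIn ".yaml" x) = true by
          intro hcontr
          rw [Bool.and_eq_true] at hcontr
          exact h1 hcontr.1), ih]

-- A's branch ('if date in textdict' with append-after-[]-creation) is one modify
lemma pv_step_modify (d : PySem.Dict String (List String)) (k : String) (v : String) :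
    (if d.contains k then d.modify k [] (· ++ [v]) else (d.insert k []).modify k [] (· ++ [v]))
      = d.modify k [] (· ++ [v]) := by
  by_cases hc : d.contains k = true
  · rw [if_pos hc]
  · have hcf : d.contains k = false := pv_bool_false hc
    rw [if_neg hc]
    show (d.insert k []).insert k (((d.insert k []).getD k []) ++ [v])
        = d.insert k ((d.getD k []) ++ [v])
    rw [PySem.Dict.getD_insert_self, PySem.Dict.insert_insert_self]
    congr 1
    simp [PySem.Dict.getD_of_not_contains, hcf]

-- A's dict loop over the filtered strings is the modify-append loop over their pairs
lemma pv_foldA (l : List String)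
    (h : ∀ x ∈ l, ((PySem.Str.split? x "/").getD []).length = 2)
    (d : PySem.Dict String (List String)) :
    l.foldl parseAStep d
      = (l.map pvToPair).foldl (fun d p => d.modify p.1 [] (fun v => v ++ [p.2])) d := by
  induction l generalizing d with
  | nil => rfl
  | cons x l ih =>
    have hab := pv_split_two (h x List.mem_cons_self)
    rw [List.foldl_cons, List.map_cons, List.foldl_cons]
    rw [show parseAStep d x = d.modify (pvToPair x).1 [] (· ++ [(pvToPair x).2]) by
      unfold parseAStep; rw [hab]; exact pv_step_modify d _ _]
    exact ih (fun x hx => h x (List.mem_cons_of_mem _ hx)) _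

-- B's collecting loop produces exactly the pairs of A's filtered list
lemma pv_pairs (l : List String)
    (h : ∀ x ∈ l, PySem.Str.isIn "/" (PySem.Str.replace x "data/" "") = true →
        PySem.Str.isIn ".yaml" (PySem.Str.replace x "data/" "") = true →
        ((PySem.Str.split? (PySem.Str.replace x "data/" "") "/").getD []).length = 2)
    (acc : List (String × String)) :
    l.foldl parseAltCollect acc
    = acc ++ (((l.map (fun x => PySem.Str.replace x "data/" "")).filter
        (fun y => PySem.Str.isIn "/" y && PySem.Str.isIn ".yaml" y)).map pvToPair) := by
  induction l generalizing acc with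
  | nil => simp
  | cons x l ih =>
    rw [List.foldl_cons, List.map_cons]
    by_cases hp : (PySem.Str.isIn "/" (PySem.Str.replace x "data/" "")
        && PySem.Str.isIn ".yaml" (PySem.Str.replace x "data/" "")) = true
    · have hp' := hp
      rw [Bool.and_eq_true] at hp'
      obtain ⟨h1, h2⟩ := hp'
      have hab := pv_split_two (h x List.mem_cons_self h1 h2)
      first
        | rw [List.filter_cons_of_pos hp]
        | rw [List.filter_cons_of_pos _ hp]
        | (simp only [List.filter_cons]; rw [if_pos hp])
      rw [List.map_cons]
      rw [show parseAltCollect acc x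
            = acc ++ [pvToPair (PySem.Str.replace x "data/" "")] by
        simp only [parseAltCollect]
        rw [hp, hab]
        simp]
      rw [ih (fun x hx => h x (List.mem_cons_of_mem _ hx))]
      rw [List.append_assoc]
      rfl
    · have hpf : (PySem.Str.isIn "/" (PySem.Str.replace x "data/" "")
          && PySem.Str.isIn ".yaml" (PySem.Str.replace x "data/" "")) = false :=
        pv_bool_false hp
      first
        | rw [List.filter_cons_of_neg hp]
        | rw [List.filter_cons_of_neg _ hp]
        | rw [List.filter_cons, if_neg hp]
      rw [show parseAltCollect acc x = acc by
        simp only [parseAltCollect]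
        rw [hpf]
        simp]
      exact ih (fun x hx => h x (List.mem_cons_of_mem _ hx)) acc

-- keys of B's grouping loop
lemma pv_B_keys (ps l : List (String × String)) (d : PySem.Dict String (List String)) :
    (l.foldl (parseAltGroup ps) d).keys = PySem.Set.update d.keys (l.map (·.1)) := by
  induction l generalizing d with
  | nil => rw [List.map_nil, PySem.Set.update_nil]; rfl
  | cons p l ih =>
    rw [List.foldl_cons, List.map_cons, PySem.Set.update_cons, ih]
    congr 1
    by_cases hc : d.contains p.1 = true
    · rw [parseAltGroup, if_pos hc,
        PySem.Set.add_of_mem ((PySem.Dict.contains_iff_mem_keys d p.1).1 hc)]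
    · have hcf : d.contains p.1 = false := pv_bool_false hc
      rw [parseAltGroup, if_neg hc, PySem.Dict.keys_insert_of_not_contains,
        PySem.Set.add_of_not_mem (fun hm => hc ((PySem.Dict.contains_iff_mem_keys d p.1).2 hm))]
      exact hcf

-- values of B's grouping loop
lemma pv_B_getD (ps l : List (String × String)) (d : PySem.Dict String (List String)) (c : String) :
    (l.foldl (parseAltGroup ps) d).getD c []
      = if d.contains c = true then d.getD c []
        else if c ∈ l.map (·.1) then parseAltVal ps c else [] := by
  induction l generalizing d with
  | nil =>
    simp only [List.foldl_nil, List.map_nil]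
    by_cases hc : d.contains c = true
    · rw [if_pos hc]
    · have hcf : d.contains c = false := pv_bool_false hc
      rw [if_neg hc, if_neg List.not_mem_nil]
      simp [PySem.Dict.getD_of_not_contains, hcf]
  | cons p l ih =>
    rw [List.foldl_cons, List.map_cons, ih]
    by_cases hc : d.contains p.1 = true
    · rw [parseAltGroup, if_pos hc]
      by_cases hcc : d.contains c = true
      · rw [if_pos hcc, if_pos hcc]
      · have hne : c ≠ p.1 := fun he => hcc (he ▸ hc)
        rw [if_neg hcc, if_neg hcc]
        by_cases hm : c ∈ List.map (fun x => x.1) l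
        · rw [if_pos hm, if_pos (List.mem_cons_of_mem _ hm)]
        · rw [if_neg hm, if_neg (by simp [List.mem_cons, hne, hm])]
    · have hcf : d.contains p.1 = false := pv_bool_false hc
      rw [parseAltGroup, if_neg hc]
      by_cases he : c = p.1
      · subst he
        rw [if_pos (PySem.Dict.contains_insert_self d p.1 (parseAltVal ps p.1)),
          PySem.Dict.getD_insert_self, if_neg hc, if_pos List.mem_cons_self]
      · have hne' : (c == p.1) = false := by simp [he]
        have hci : (d.insert p.1 (parseAltVal ps p.1)).contains c = d.contains c := by
          rw [PySem.Dict.contains_insert, hne', Bool.false_or]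
        have hgd : (d.insert p.1 (parseAltVal ps p.1)).getD c [] = d.getD c [] := by
          rw [PySem.Dict.getD_insert_of_ne]
          exact he
        rw [hci, hgd]
        by_cases hdc : d.contains c = true
        · rw [if_pos hdc, if_pos hdc]
        · rw [if_neg hdc, if_neg hdc]
          by_cases hm : c ∈ List.map (fun x => x.1) l
          · rw [if_pos hm, if_pos (List.mem_cons_of_mem _ hm)]
          · rw [if_neg hm, if_neg (by simp [List.mem_cons, he, hm])]

-- the two grouping loops build dicts with identical items
lemma pv_core (ps : List (String × String)) :
    (ps.foldl (fun d p => d.modify p.1 [] (fun v => v ++ [p.2]))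
      (PySem.Dict.empty : PySem.Dict String (List String))).items
    = (ps.foldl (parseAltGroup ps) PySem.Dict.empty).items := by
  have hAk : (ps.foldl (fun d p => d.modify p.1 [] (fun v => v ++ [p.2]))
      (PySem.Dict.empty : PySem.Dict String (List String))).keys
      = PySem.Set.ofList (ps.map (·.1)) := by
    rw [PySem.Dict.keys_foldl_modify_key]
    simp [PySem.Set.update_nil_left]
  have hBk : (ps.foldl (parseAltGroup ps) (PySem.Dict.empty : PySem.Dict String (List String))).keys
      = PySem.Set.ofList (ps.map (·.1)) := by
    rw [pv_B_keys]
    simp [PySem.Set.update_nil_left]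
  have hAn : (ps.foldl (fun d p => d.modify p.1 [] (fun v => v ++ [p.2]))
      (PySem.Dict.empty : PySem.Dict String (List String))).keys.Nodup := by
    rw [hAk]; exact PySem.Set.nodup_ofList _
  have hBn : (ps.foldl (parseAltGroup ps)
      (PySem.Dict.empty : PySem.Dict String (List String))).keys.Nodup := by
    rw [hBk]; exact PySem.Set.nodup_ofList _
  rw [PySem.Dict.items_eq_map_keys _ hAn [], PySem.Dict.items_eq_map_keys _ hBn [], hAk, hBk]
  apply List.map_congr_left
  intro k hk
  have hmem : k ∈ ps.map (·.1) := (PySem.Set.mem_ofList _ _).1 hk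
  have hA : (ps.foldl (fun d p => d.modify p.1 [] (fun v => v ++ [p.2]))
      (PySem.Dict.empty : PySem.Dict String (List String))).getD k [] = parseAltVal ps k := by
    rw [PySem.Dict.getD_foldl_modify_append]
    simp [parseAltVal]
  have hB : (ps.foldl (parseAltGroup ps)
      (PySem.Dict.empty : PySem.Dict String (List String))).getD k [] = parseAltVal ps k := by
    rw [pv_B_getD]
    simp [hmem]
  rw [hA, hB]

-- ===== VERDICT (by name: the statement is the Claim_ definition above) =====
theorem parse_spec : Claim_equal_parse := by
  intro data_in _ h
  unfold Pre_parse at h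
  show parse data_in = parse_alt data_in
  simp only [parse, parse_alt]
  rw [PySem.List.foldl_append_singleton_eq_map, List.nil_append, pv_filter_fuse,
    pv_pairs data_in h [], List.nil_append]
  have h2 : ∀ y ∈ (data_in.map (fun x => PySem.Str.replace x "data/" "")).filter
      (fun y => PySem.Str.isIn "/" y && PySem.Str.isIn ".yaml" y),
      ((PySem.Str.split? y "/").getD []).length = 2 := by
    intro y hy
    obtain ⟨hy1, hy2⟩ := List.mem_filter.1 hy
    obtain ⟨x, hx, rfl⟩ := List.mem_map.1 hy1
    simp only [Bool.and_eq_true] at hy2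
    exact h x hx hy2.1 hy2.2
  rw [pv_foldA _ h2]
  exact pv_core _
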